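-- pv_equiv track=rewrite | github.com/nathanwn/aoc-py | y2023/day03/main.py | extract_nums
-- ===== SOURCE A (Python) =====
-- from typing import NamedTuple
--
-- class Num(NamedTuple):
--     row: int
--     col_start: int
--     col_end: int
--     val: int
--
-- def new_num(grid: list[str], row: int, col_start: int, col_end: int) -> Num:
--     return Num(
--         row,
--         col_start,
--         col_end,
--         val=int(grid[row][col_start : col_end + 1]),
--     )
--
-- def extract_nums(grid: list[str]) -> list[Num]:
--     nums: list[Num] = []
--
--     for row in range(len(grid)):
--         col_start = -1
--         for col in range(len(grid[row])):
--             c = grid[row][col]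
--             if not c.isdigit():
--                 if col_start != -1:
--                     nums.append(new_num(grid, row, col_start, col - 1))
--                     col_start = -1
--             elif col_start == -1:
--                 col_start = col
--         if col_start != -1:
--             nums.append(new_num(grid, row, col_start, len(grid[row]) - 1))
--
--     return nums
-- ===== SOURCE B (Python) =====
-- import re
-- from typing import NamedTuple
--
--
-- class Num(NamedTuple):
--     row: int
--     col_start: int
--     col_end: int
--     val: int
--
--
-- def extract_nums(grid: list[str]) -> list[Num]:
--     return [
--         Num(row, m.start(), m.end() - 1, int(m.group()))
--         for row in range(len(grid))
--         for m in re.finditer(r"\d+", grid[row])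
--     ]
-- ===== Notes on version B (the rewrite author's own statement) =====
-- stated objective: idiomatic
-- what changed: Replaces the hand-written col_start state machine (with its end-of-row flush) by a regex scan: one re.finditer(r'\d+', row) per row yields the maximal digit runs directly, turned into Nums in a single comprehension.
import Mathlib
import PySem

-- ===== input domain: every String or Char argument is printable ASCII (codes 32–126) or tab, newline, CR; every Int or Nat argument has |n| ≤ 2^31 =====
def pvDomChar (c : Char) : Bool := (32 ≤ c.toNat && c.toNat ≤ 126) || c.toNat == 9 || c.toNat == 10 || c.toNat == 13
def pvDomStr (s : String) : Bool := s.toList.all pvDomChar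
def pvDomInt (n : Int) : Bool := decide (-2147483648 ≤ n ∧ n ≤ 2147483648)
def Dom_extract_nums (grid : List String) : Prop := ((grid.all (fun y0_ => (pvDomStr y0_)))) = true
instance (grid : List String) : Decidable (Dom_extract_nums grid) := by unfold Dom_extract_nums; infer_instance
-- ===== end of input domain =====

-- B replaces A's col_start state machine (with its end-of-row flush) by a per-row scan that
-- extracts maximal digit runs directly (re.finditer(r'\d+', row) in Python); idiomatic, same cost.

-- ===== PORT A =====
-- new_num: grid[row] is always in range where A calls it, so getD "" never fires;
-- int(...) is applied to a nonempty digit string, so ofChars? is always some and getD 0 never fires.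
def pvNewNum (grid : List String) (row cs ce : Int) : Int × Int × Int × Int :=
  let s := (PySem.List.pyGet? grid row).getD ""
  (row, cs, ce, (PySem.Int.ofChars? (PySem.List.slice s.toList (some cs) (some (ce + 1)))).getD 0)

-- the inner 'for col in range(len(grid[row]))' loop: chars of grid[row] with col counter, cs = col_start
def pvRowLoopA (grid : List String) (row : Int) :
    List Char → Int → Int → List (Int × Int × Int × Int) → List (Int × Int × Int × Int)
  | [], col, cs, nums =>
      if cs ≠ -1 then nums ++ [pvNewNum grid row cs (col - 1)] else nums
  | c :: rest, col, cs, nums =>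
      if ¬ PySem.Chars.isdigit c then
        if cs ≠ -1 then pvRowLoopA grid row rest (col + 1) (-1) (nums ++ [pvNewNum grid row cs (col - 1)])
        else pvRowLoopA grid row rest (col + 1) cs nums
      else if cs = -1 then pvRowLoopA grid row rest (col + 1) col nums
      else pvRowLoopA grid row rest (col + 1) cs nums

-- the outer 'for row in range(len(grid))' loop
def pvRowsA (grid : List String) :
    List String → Int → List (Int × Int × Int × Int) → List (Int × Int × Int × Int)
  | [], _, nums => nums
  | s :: rest, row, nums => pvRowsA grid rest (row + 1) (pvRowLoopA grid row s.toList 0 (-1) nums)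

def extract_nums (grid : List String) : List (Int × Int × Int × Int) :=
  pvRowsA grid grid 0 []

-- ===== PORT B =====
-- re.finditer(r'\d+', s): the (start, end) spans of the maximal digit runs of s, left to right.
-- On the stated ASCII domain '\d' is exactly Chars.isdigit.
def pvSpans : List Char → Int → List (Int × Int)
  | [], _ => []
  | c :: rest, i =>
      if h : PySem.Chars.isdigit c then
        (i, i + (List.takeWhile PySem.Chars.isdigit (c :: rest)).length)
          :: pvSpans (List.dropWhile PySem.Chars.isdigit (c :: rest))
               (i + (List.takeWhile PySem.Chars.isdigit (c :: rest)).length)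
      else pvSpans rest (i + 1)
  termination_by t _ => t.length
  decreasing_by
  · simp only [List.dropWhile_cons, h, if_true]
    exact Nat.lt_succ_of_le (List.length_dropWhile_le _ _)
  · simp

-- Num(row, m.start(), m.end()-1, int(m.group())); m.group() = s[m.start():m.end()]
def pvNumB (row : Int) (s : List Char) (p : Int × Int) : Int × Int × Int × Int :=
  (row, p.1, p.2 - 1, (PySem.Int.ofChars? (PySem.List.slice s (some p.1) (some p.2))).getD 0)

def pvRowsB : List String → Int → List (Int × Int × Int × Int)
  | [], _ => []
  | s :: rest, row => (pvSpans s.toList 0).map (pvNumB row s.toList) ++ pvRowsB rest (row + 1)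

def extract_nums_alt (grid : List String) : List (Int × Int × Int × Int) :=
  pvRowsB grid 0

-- ===== PRECONDITION & SPEC =====
def Spec_extract_nums (grid : List String) (out : List (Int × Int × Int × Int)) : Prop := out = extract_nums_alt grid
instance (grid : List String) (out : List (Int × Int × Int × Int)) : Decidable (Spec_extract_nums grid out) := by unfold Spec_extract_nums; infer_instance

-- ===== CLAIM (what is proved, stated in full; the proofs are below) =====
def Claim_equal_extract_nums : Prop := ∀ (grid : List String), Dom_extract_nums grid → Spec_extract_nums grid (extract_nums grid)

-- ===== LEMMAS AND PROOFS =====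

-- Per-row core: A's state machine over grid[row] equals B's span extraction.
-- Part 1 (cs = -1, no active run); Part 2 (cs ≠ -1: an active run that started at cs).
theorem pvLoop_eq (grid : List String) (row : Int) (s : String)
    (hs : (PySem.List.pyGet? grid row).getD "" = s) :
    ∀ t : List Char,
      (∀ col nums, 0 ≤ col →
        pvRowLoopA grid row t col (-1) nums = nums ++ (pvSpans t col).map (pvNumB row s.toList))
      ∧ (∀ col cs nums, 0 ≤ col → cs ≠ -1 →
        pvRowLoopA grid row t col cs nums
          = nums ++ [pvNumB row s.toList (cs, col + (t.takeWhile PySem.Chars.isdigit).length)]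
              ++ (pvSpans (t.dropWhile PySem.Chars.isdigit)
                    (col + (t.takeWhile PySem.Chars.isdigit).length)).map (pvNumB row s.toList)) := by
  have hnum : ∀ cs ce : Int, pvNewNum grid row cs ce = pvNumB row s.toList (cs, ce + 1) := by
    intro cs ce
    simp [pvNewNum, pvNumB, hs]
  intro t
  induction t with
  | nil =>
    constructor
    · intro col nums _
      simp [pvRowLoopA, pvSpans]
    · intro col cs nums _ hcs
      simp [pvRowLoopA, pvSpans, hcs, hnum]
  | cons c rest ih =>
    by_cases hd : PySem.Chars.isdigit c
    · -- digit head
      have hsp : ∀ i : Int, pvSpans (c :: rest) i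
          = (i, i + ((rest.takeWhile PySem.Chars.isdigit).length + 1 : Nat))
              :: pvSpans (rest.dropWhile PySem.Chars.isdigit)
                   (i + ((rest.takeWhile PySem.Chars.isdigit).length + 1 : Nat)) := by
        intro i
        rw [pvSpans]
        simp [hd]
      constructor
      · intro col nums hcol
        have hstep : pvRowLoopA grid row (c :: rest) col (-1) nums
            = pvRowLoopA grid row rest (col + 1) col nums := by
          simp [pvRowLoopA, hd]
        rw [hstep, ih.2 (col + 1) col nums (by omega) (by omega), hsp]
        push_cast
        ring_nf
        simp
      · intro col cs nums hcol hcs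
        have hstep : pvRowLoopA grid row (c :: rest) col cs nums
            = pvRowLoopA grid row rest (col + 1) cs nums := by
          simp [pvRowLoopA, hd, hcs]
        rw [hstep, ih.2 (col + 1) cs nums (by omega) hcs]
        simp only [List.takeWhile_cons, List.dropWhile_cons, hd, if_true, List.length_cons]
        push_cast
        ring_nf
    · -- non-digit head
      have hsp : ∀ i : Int, pvSpans (c :: rest) i = pvSpans rest (i + 1) := by
        intro i
        rw [pvSpans]
        simp [hd]
      constructor
      · intro col nums hcol
        have hstep : pvRowLoopA grid row (c :: rest) col (-1) nums
            = pvRowLoopA grid row rest (col + 1) (-1) nums := by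
          simp [pvRowLoopA, hd]
        rw [hstep, ih.1 (col + 1) nums (by omega), hsp]
      · intro col cs nums hcol hcs
        have hstep : pvRowLoopA grid row (c :: rest) col cs nums
            = pvRowLoopA grid row rest (col + 1) (-1) (nums ++ [pvNewNum grid row cs (col - 1)]) := by
          simp [pvRowLoopA, hd, hcs]
        rw [hstep, ih.1 (col + 1) _ (by omega), hnum cs (col - 1)]
        simp only [List.takeWhile_cons, List.dropWhile_cons, hd, Bool.false_eq_true, if_false,
          List.length_nil, Nat.cast_zero, add_zero]
        rw [hsp col]
        simp [List.append_assoc]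

theorem pvRows_eq (grid : List String) :
    ∀ gs (k : Nat), grid.drop k = gs → ∀ nums,
      pvRowsA grid gs (k : Int) nums = nums ++ pvRowsB gs (k : Int) := by
  intro gs
  induction gs with
  | nil =>
    intro k _ nums
    show nums = nums ++ pvRowsB [] (k : Int)
    simp [pvRowsB]
  | cons s rest ih =>
    intro k hk nums
    have hklen : k < grid.length := by
      by_contra h
      rw [List.drop_eq_nil_of_le (by omega)] at hk
      exact (List.cons_ne_nil s rest) hk.symm
    have hget : grid[k]? = some s := by
      have h0 : (grid.drop k)[0]? = grid[k + 0]? := List.getElem?_drop ..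
      simpa [hk] using h0.symm
    have hpy : (PySem.List.pyGet? grid (k : Int)).getD "" = s := by
      simp [pysem, hget]
    have hdrop : grid.drop (k + 1) = rest := by
      simp [← List.tail_drop, hk]
    show pvRowsA grid (s :: rest) (k : Int) nums = nums ++ pvRowsB (s :: rest) (k : Int)
    rw [show pvRowsA grid (s :: rest) (k : Int) nums
          = pvRowsA grid rest ((k : Int) + 1) (pvRowLoopA grid (k : Int) s.toList 0 (-1) nums) from rfl]
    rw [(pvLoop_eq grid (k : Int) s hpy s.toList).1 0 nums (by omega)]
    have : ((k : Int) + 1) = ((k + 1 : Nat) : Int) := by push_cast; ring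
    rw [this, ih (k + 1) hdrop]
    simp [pvRowsB]

-- ===== VERDICT (by name: the statement is the Claim_ definition above) =====
theorem extract_nums_spec : Claim_equal_extract_nums := by
  intro grid _
  show extract_nums grid = extract_nums_alt grid
  have h := pvRows_eq grid grid 0 (by simp) []
  simpa [extract_nums, extract_nums_alt] using h
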